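-- pv_equiv track=rewrite | github.com/supplyshark/supplyshark | shark/clean.py | package_gem
-- ===== SOURCE A (Python) =====
-- def package_gem(gem):
--     for ch in ['"', "'", "`", "{", "}"]:
--         if ch in gem:
--             gem = gem.replace(ch, "")
--
--     gem = gem.split(",")[0].split(":")[0].split("\\")[0]
--     gem = gem.split("/")[0].split(" ")[0].split("#")[0]
--     gem = gem.split("<")[0].split(";")[0]
--
--     if gem.endswith(".gem"):
--         gem = ""
--     elif gem.startswith("."):
--         gem = ""
--     elif gem.endswith("."):
--         gem = gem[:-1]
--     elif gem.startswith("$"):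
--         gem = ""
--     elif gem.endswith("-"):
--         gem = ""
--     elif "(" in gem:
--         gem = ""
--     elif "%" in gem:
--         gem = ""
--
--     return gem
-- ===== SOURCE B (Python) =====
-- STRIP = set('"\'`{}')
-- DELIMS = set(',:\\/ #<;')
--
-- def package_gem(gem):
--     # one pass: drop the quote/brace characters, stop at the first delimiter
--     kept = [c for c in gem if c not in STRIP]
--     head = []
--     for c in kept:
--         if c in DELIMS:
--             break
--         head.append(c)
--     gem = ''.join(head)
--     if gem.endswith(".gem") or gem.startswith("."):
--         return ""
--     if gem.endswith("."):
--         return gem[:-1]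
--     if gem.startswith("$") or gem.endswith("-") or "(" in gem or "%" in gem:
--         return ""
--     return gem
-- ===== Notes on version B (the rewrite author's own statement) =====
-- stated objective: simpler
-- what changed: A's five in-place replace passes and eight split(sep)[0] scans are replaced by one filter that drops the quote/brace characters and one stop-at-first-delimiter scan, with the elif chain collapsed into grouped early returns.
import Mathlib
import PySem

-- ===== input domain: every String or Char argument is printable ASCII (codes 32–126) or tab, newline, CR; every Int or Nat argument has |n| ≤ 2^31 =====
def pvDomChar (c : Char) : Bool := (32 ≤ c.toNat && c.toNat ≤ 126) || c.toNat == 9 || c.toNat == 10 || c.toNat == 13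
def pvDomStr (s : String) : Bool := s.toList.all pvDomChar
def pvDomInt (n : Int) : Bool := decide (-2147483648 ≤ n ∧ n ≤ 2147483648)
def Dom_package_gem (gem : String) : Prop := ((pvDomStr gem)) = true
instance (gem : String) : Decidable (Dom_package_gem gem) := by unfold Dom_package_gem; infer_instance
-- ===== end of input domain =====

-- B replaces A's five replace passes and eight split-and-take-first scans by one filter plus
-- one stop-at-first-delimiter scan and a grouped early-return tail (objective: simpler).

-- ===== PORT A =====
-- literal port of A on the code-point list; split(sep)[0] for a non-empty sep is total
-- (the split is never empty), so the [0] indexing is ported as headD.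
def package_gem (gem : String) : String :=
  let g := gem.toList
  let g := ['"', '\'', '`', '{', '}'].foldl
    (fun g ch => if PySem.Chars.isIn [ch] g then PySem.Chars.replace g [ch] [] else g) g
  let g := ((PySem.Chars.splitOn g [',']).headD [])
  let g := ((PySem.Chars.splitOn g [':']).headD [])
  let g := ((PySem.Chars.splitOn g ['\\']).headD [])
  let g := ((PySem.Chars.splitOn g ['/']).headD [])
  let g := ((PySem.Chars.splitOn g [' ']).headD [])
  let g := ((PySem.Chars.splitOn g ['#']).headD [])
  let g := ((PySem.Chars.splitOn g ['<']).headD [])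
  let g := ((PySem.Chars.splitOn g [';']).headD [])
  if PySem.Chars.endswith g ['.', 'g', 'e', 'm'] then ""
  else if PySem.Chars.startswith g ['.'] then ""
  else if PySem.Chars.endswith g ['.'] then String.ofList (PySem.List.slice g none (some (-1)))
  else if PySem.Chars.startswith g ['$'] then ""
  else if PySem.Chars.endswith g ['-'] then ""
  else if PySem.Chars.isIn ['('] g then ""
  else if PySem.Chars.isIn ['%'] g then ""
  else String.ofList g

-- ===== PORT B =====
def pgStrip : List Char := ['"', '\'', '`', '{', '}']
def pgDelims : List Char := [',', ':', '\\', '/', ' ', '#', '<', ';']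

def package_gem_alt (gem : String) : String :=
  let kept := gem.toList.filter (fun c => !pgStrip.contains c)
  let head := kept.takeWhile (fun c => !pgDelims.contains c)
  if PySem.Chars.endswith head ['.', 'g', 'e', 'm'] || PySem.Chars.startswith head ['.'] then ""
  else if PySem.Chars.endswith head ['.'] then String.ofList head.dropLast
  else if PySem.Chars.startswith head ['$'] || PySem.Chars.endswith head ['-']
       || PySem.Chars.isIn ['('] head || PySem.Chars.isIn ['%'] head then ""
  else String.ofList head

-- ===== PRECONDITION & SPEC =====
def Spec_package_gem (gem : String) (out : String) : Prop := out = package_gem_alt gem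
instance (gem : String) (out : String) : Decidable (Spec_package_gem gem out) := by unfold Spec_package_gem; infer_instance

-- ===== CLAIM (what is proved, stated in full; the proofs are below) =====
def Claim_equal_package_gem : Prop := ∀ (gem : String), Dom_package_gem gem → Spec_package_gem gem (package_gem gem)

-- ===== LEMMAS AND PROOFS =====

-- single-character replace-by-empty is filter
theorem pg_replace_go (c : Char) : ∀ (fuel : Nat) (l acc : List Char), l.length ≤ fuel →
    PySem.Chars.replace.go [c] [] fuel l acc = acc.reverse ++ l.filter (fun x => x != c) := by
  intro fuel
  induction fuel with
  | zero =>
    intro l acc h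
    have hl : l = [] := List.eq_nil_of_length_eq_zero (Nat.le_zero.mp h)
    subst hl; simp [PySem.Chars.replace.go]
  | succ n ih =>
    intro l acc h
    cases l with
    | nil => simp [PySem.Chars.replace.go]
    | cons x t =>
      simp only [PySem.Chars.replace.go]
      by_cases hx : c = x
      · rw [if_pos (by simp [List.isPrefixOf, hx])]
        subst hx
        simp only [List.length_cons, List.length_nil, Nat.zero_add, List.drop_succ_cons,
          List.drop_zero, List.reverse_nil, List.nil_append]
        rw [ih t acc (by simpa using h)]
        simp
      · rw [if_neg (by simp [List.isPrefixOf]; intro he; exact hx he)]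
        rw [ih t (x :: acc) (by simpa using h)]
        have hxc : (x != c) = true := by simp [bne]; intro he; exact hx he.symm
        simp [hxc]

theorem pg_replace_step (c : Char) (g : List Char) :
    (if PySem.Chars.isIn [c] g then PySem.Chars.replace g [c] [] else g)
      = g.filter (fun x => x != c) := by
  by_cases h : PySem.Chars.isIn [c] g
  · rw [if_pos h]
    show PySem.Chars.replace g [c] [] = _
    unfold PySem.Chars.replace
    rw [if_neg (by simp)]
    simpa using pg_replace_go c g.length g [] le_rfl
  · rw [if_neg h]
    have hmem : c ∉ g := by
      intro hc
      obtain ⟨s, t, rfl⟩ := List.append_of_mem hc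
      exact h ((PySem.Chars.isIn_iff_infix _ _).2 ⟨s, t, by simp⟩)
    symm
    apply List.filter_eq_self.2
    intro x hx
    simp [bne]
    intro he; exact hmem (he ▸ hx)

-- the accumulator of splitOn.go factors out
theorem pg_split_go_acc (d : Char) : ∀ (fuel : Nat) (l cur : List Char) (acc : List (List Char)),
    PySem.Chars.splitOn.go [d] fuel l cur acc
      = acc.reverse ++ PySem.Chars.splitOn.go [d] fuel l cur [] := by
  intro fuel
  induction fuel with
  | zero => intro l cur acc; cases l <;> simp [PySem.Chars.splitOn.go]
  | succ n ih =>
    intro l cur acc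
    cases l with
    | nil => simp [PySem.Chars.splitOn.go]
    | cons x t =>
      simp only [PySem.Chars.splitOn.go]
      by_cases hx : d = x
      · rw [if_pos (by simp [List.isPrefixOf, hx]), if_pos (by simp [List.isPrefixOf, hx])]
        rw [ih _ [] (cur.reverse :: acc), ih _ [] [cur.reverse]]
        simp
      · rw [if_neg (by simp [List.isPrefixOf]; intro he; exact hx he),
            if_neg (by simp [List.isPrefixOf]; intro he; exact hx he)]
        exact ih t (x :: cur) acc

-- the first piece produced by splitOn.go
theorem pg_split_go_head (d : Char) : ∀ (fuel : Nat) (l cur : List Char), l.length ≤ fuel →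
    ∃ rest, PySem.Chars.splitOn.go [d] fuel l cur []
      = (cur.reverse ++ l.takeWhile (fun x => x != d)) :: rest := by
  intro fuel
  induction fuel with
  | zero =>
    intro l cur h
    have hl : l = [] := List.eq_nil_of_length_eq_zero (Nat.le_zero.mp h)
    subst hl; exact ⟨[], by simp [PySem.Chars.splitOn.go]⟩
  | succ n ih =>
    intro l cur h
    cases l with
    | nil => exact ⟨[], by simp [PySem.Chars.splitOn.go]⟩
    | cons x t =>
      simp only [PySem.Chars.splitOn.go]
      by_cases hx : d = x
      · rw [if_pos (by simp [List.isPrefixOf, hx])]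
        rw [pg_split_go_acc d n _ [] [cur.reverse]]
        have hxd : (x != d) = false := by simp [bne, hx]
        refine ⟨PySem.Chars.splitOn.go [d] n (List.drop [d].length (x :: t)) [] [], ?_⟩
        simp [hxd]
      · rw [if_neg (by simp [List.isPrefixOf]; intro he; exact hx he)]
        obtain ⟨rest, hr⟩ := ih t (x :: cur) (by simpa using h)
        have hxd : (x != d) = true := by simp [bne]; intro he; exact hx he.symm
        exact ⟨rest, by rw [hr]; simp [hxd]⟩

-- split(sep)[0] for a one-character separator is takeWhile
theorem pg_split_head (d : Char) (l : List Char) :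
    (PySem.Chars.splitOn l [d]).headD [] = l.takeWhile (fun x => x != d) := by
  unfold PySem.Chars.splitOn
  obtain ⟨rest, hr⟩ := pg_split_go_head d (l.length + 1) l [] (by omega)
  simp [hr]

theorem pg_takeWhile_takeWhile (p q : Char → Bool) (l : List Char) :
    (l.takeWhile p).takeWhile q = l.takeWhile fun c => p c && q c := by
  induction l with
  | nil => rfl
  | cons c t ih => by_cases hp : p c <;> by_cases hq : q c <;> simp [hp, hq, ih]

-- ===== VERDICT (by name: the statement is the Claim_ definition above) =====
theorem package_gem_spec : Claim_equal_package_gem := by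
  intro gem _
  unfold Spec_package_gem package_gem package_gem_alt
  simp only [List.foldl_cons, List.foldl_nil, pg_replace_step, pg_split_head,
    List.filter_filter, pg_takeWhile_takeWhile, PySem.List.slice_to_neg_one]
  have e1 : List.filter (fun a => a != '}' && (a != '{' && (a != '`' && (a != '\'' && a != '\"')))) gem.toList
      = List.filter (fun c => !pgStrip.contains c) gem.toList := by
    apply List.filter_congr
    intro x _
    simp [pgStrip, bne]
    by_cases h1 : x = '"' <;> by_cases h2 : x = '\'' <;> by_cases h3 : x = '`'
      <;> by_cases h4 : x = '{' <;> by_cases h5 : x = '}' <;> simp [h1, h2, h3, h4, h5]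
  have e2 : (fun c => (((((((c != ',' && c != ':') && c != '\\') && c != '/') && c != ' ')
        && c != '#') && c != '<') && c != ';'))
      = (fun c : Char => !pgDelims.contains c) := by
    funext x
    simp [pgDelims, bne]
    by_cases h1 : x = ',' <;> by_cases h2 : x = ':' <;> by_cases h3 : x = '\\'
      <;> by_cases h4 : x = '/' <;> by_cases h5 : x = ' ' <;> by_cases h6 : x = '#'
      <;> by_cases h7 : x = '<' <;> by_cases h8 : x = ';' <;> simp [h1, h2, h3, h4, h5, h6, h7, h8]
  rw [e1, e2]
  split_ifs <;> simp_all
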